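-- pv_equiv track=rewrite | github.com/nebriv/vtolMapMaker | lib/helpers.py | splitHeight
-- ===== SOURCE A (Python) =====
-- def splitColor(color, count):
--     splits = []
--     i = 0
--     while i < count:
--         if color > 255:
--             splits.append(255)
--             color = color - 255
--         elif color > 0:
--             splits.append(color)
--             color = color - 255
--         else:
--             splits.append(0)
--         i += 1
--     return splits
--
-- def splitHeight(pixels, count):
--     split_colors = []
--     for i in range(count):
--         split_colors.append([])
--
--
--     for pixel in pixels:
--         splits = splitColor(int(pixel),count)
--         for i in range(count):
--             split_colors[i].append(splits[i])
--
--     return split_colors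
-- ===== SOURCE B (Python) =====
-- def splitHeight(pixels, count):
--     vals = [int(p) for p in pixels]
--     return [[0 if v <= off else 255 if v - off > 255 else v - off for v in vals]
--             for off in range(0, 255 * count, 255)]
-- ===== Notes on version B (the rewrite author's own statement) =====
-- stated objective: simpler
-- what changed: Replaces the per-pixel sequential 255-subtraction while-loop and the append-into-preallocated-lists bookkeeping with a comprehension that computes each channel value by the closed form clamp(pixel - offset, 0, 255) for offset in range(0, 255*count, 255), iterating channels outer and pixels inner.
import Mathlib
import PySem

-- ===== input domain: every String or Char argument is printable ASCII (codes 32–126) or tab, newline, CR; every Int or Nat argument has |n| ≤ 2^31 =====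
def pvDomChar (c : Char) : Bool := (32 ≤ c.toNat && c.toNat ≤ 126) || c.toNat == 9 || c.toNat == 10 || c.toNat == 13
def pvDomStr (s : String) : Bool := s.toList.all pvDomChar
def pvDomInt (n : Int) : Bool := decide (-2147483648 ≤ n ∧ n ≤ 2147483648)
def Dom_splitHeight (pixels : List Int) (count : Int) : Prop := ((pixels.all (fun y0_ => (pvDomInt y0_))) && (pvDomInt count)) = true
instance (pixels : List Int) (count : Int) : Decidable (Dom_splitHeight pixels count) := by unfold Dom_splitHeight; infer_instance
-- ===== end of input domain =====

-- B replaces A's sequential 255-subtraction while-loop with a per-channel closed-form clamp (simpler).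

-- ===== PORT A =====
-- splitColor's while-loop: one recursive step per iteration; fuel = number of iterations
-- (i runs 0,1,…; the loop executes exactly max(count,0) = count.toNat times).
def splitColorGo (color : Int) (fuel : Nat) : List Int :=
  match fuel with
  | 0 => []
  | n + 1 =>
    if color > 255 then 255 :: splitColorGo (color - 255) n
    else if color > 0 then color :: splitColorGo (color - 255) n
    else 0 :: splitColorGo color n

def splitColor (color : Int) (count : Int) : List Int := splitColorGo color count.toNat

def splitHeight (pixels : List Int) (count : Int) : List (List Int) :=
  -- for i in range(count): split_colors.append([])
  let init : List (List Int) := (PySem.List.pyRange 0 count 1).map (fun _ => ([] : List Int))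
  -- for pixel in pixels: splits = splitColor(int(pixel), count);
  --   for i in range(count): split_colors[i].append(splits[i])
  -- (split_colors and splits both have length count, so the inner index loop
  --  appends splits[i] to split_colors[i] pointwise = zipWith append-singleton)
  pixels.foldl (fun acc p => List.zipWith (fun l s => l ++ [s]) acc (splitColor p count)) init

-- ===== PORT B =====
def splitHeight_alt (pixels : List Int) (count : Int) : List (List Int) :=
  let vals := pixels.map (fun p => p)  -- vals = [int(p) for p in pixels]; int() on an int is the identity
  (PySem.List.pyRange 0 (255 * count) 255).map
    (fun off => vals.map (fun v => if v ≤ off then 0 else if v - off > 255 then 255 else v - off))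

-- ===== PRECONDITION & SPEC =====
def Spec_splitHeight (pixels : List Int) (count : Int) (out : List (List Int)) : Prop := out = splitHeight_alt pixels count
instance (pixels : List Int) (count : Int) (out : List (List Int)) : Decidable (Spec_splitHeight pixels count out) := by unfold Spec_splitHeight; infer_instance

-- ===== CLAIM (what is proved, stated in full; the proofs are below) =====
def Claim_equal_splitHeight : Prop := ∀ (pixels : List Int) (count : Int), Dom_splitHeight pixels count → Spec_splitHeight pixels count (splitHeight pixels count)

-- ===== LEMMAS AND PROOFS =====

theorem zipWith_map_same {α β γ δ : Type} (f : β → γ → δ) (g : α → β) (h : α → γ) (l : List α) :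
    List.zipWith f (l.map g) (l.map h) = l.map (fun x => f (g x) (h x)) := by
  induction l with
  | nil => rfl
  | cons a t ih => simp [ih]

theorem splitColorGo_eq (c : Int) (n : Nat) :
    splitColorGo c n = (List.range n).map (fun k : Nat => max 0 (min 255 (c - 255 * (k : Int)))) := by
  induction n generalizing c with
  | zero => rfl
  | succ m ih =>
    rw [List.range_succ_eq_map]
    unfold splitColorGo
    split_ifs with h1 h2
    · simp only [List.map_cons, List.map_map, ih, List.cons.injEq]
      constructor
      · omega
      · apply List.map_congr_left; intro k _; simp only [Function.comp]
        push_cast; congr 1; omega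
    · simp only [List.map_cons, List.map_map, ih, List.cons.injEq]
      constructor
      · omega
      · apply List.map_congr_left; intro k _; simp only [Function.comp]
        push_cast; congr 1; omega
    · simp only [List.map_cons, List.map_map, ih, List.cons.injEq]
      constructor
      · omega
      · apply List.map_congr_left; intro k _; simp only [Function.comp]
        push_cast; omega

theorem foldl_split (ps : List Int) (n : Nat) (g : Nat → List Int) :
    ps.foldl (fun acc p => List.zipWith (fun l s => l ++ [s]) acc (splitColorGo p n))
        ((List.range n).map g)
      = (List.range n).map
          (fun k : Nat => g k ++ ps.map (fun p => max 0 (min 255 (p - 255 * (k : Int))))) := by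
  induction ps generalizing g with
  | nil => simp
  | cons p t ih =>
    simp only [List.foldl_cons]
    rw [splitColorGo_eq, zipWith_map_same, ih]
    apply List.map_congr_left; intro k _
    simp

theorem splitHeight_spec' (pixels : List Int) (count : Int) :
    splitHeight pixels count = splitHeight_alt pixels count := by
  unfold splitHeight splitHeight_alt splitColor
  rw [PySem.List.pyRange_one, PySem.List.pyRange_of_pos 0 (255 * count) (by norm_num)]
  have hlen : (if (0:Int) < 255 * count then ((255 * count - 0 + 255 - 1) / 255).toNat else 0)
      = count.toNat := by
    split_ifs with h
    · have he : (255 * count - 0 + 255 - 1) = 254 + count * 255 := by ring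
      rw [he, Int.add_mul_ediv_right 254 count (by norm_num)]
      norm_num
    · omega
  rw [hlen]
  simp only [zero_add, Int.sub_zero, List.map_map, Function.comp_def]
  rw [foldl_split pixels count.toNat (fun _ => ([] : List Int))]
  apply List.map_congr_left; intro k _
  simp only [List.nil_append]
  apply List.map_congr_left; intro v _
  split_ifs <;> omega

-- ===== VERDICT (by name: the statement is the Claim_ definition above) =====
theorem splitHeight_spec : Claim_equal_splitHeight := by
  intro pixels count _
  exact splitHeight_spec' pixels count
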